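-- pv_equiv track=rewrite | github.com/rnaksdl/IR-See | scripts/401_guess_90.py | prioritize_same_digit_pins
-- ===== SOURCE A (Python) =====
-- PIN_LENGTH = 4
--
-- def prioritize_same_digit_pins(pin_scores, is_same_digit):
--     if not is_same_digit:
--         return pin_scores
--     priority_pins = [str(digit)*PIN_LENGTH for digit in range(1, 10)] + ["0"*PIN_LENGTH]
--     prioritized_scores = []
--     non_priority_pins = []
--     for pin, score in pin_scores:
--         if pin not in priority_pins:
--             non_priority_pins.append((pin, score))
--     for p_pin in priority_pins:
--         for pin, score in pin_scores:
--             if pin == p_pin: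
--                 prioritized_scores.append((pin, score))
--                 break
--     prioritized_scores.extend(non_priority_pins)
--     return prioritized_scores
-- ===== SOURCE B (Python) =====
-- PIN_LENGTH = 4
--
-- def prioritize_same_digit_pins(pin_scores, is_same_digit):
--     if not is_same_digit:
--         return pin_scores
--     priority_order = [str(digit)*PIN_LENGTH for digit in range(1, 10)] + ["0"*PIN_LENGTH]
--     priority_set = set(priority_order)
--     first = {}
--     rest = []
--     for pin, score in pin_scores:
--         if pin in priority_set:
--             if pin not in first:
--                 first[pin] = (pin, score)
--         else:
--             rest.append((pin, score))
--     return [first[p] for p in priority_order if p in first] + rest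
-- ===== Notes on version B (the rewrite author's own statement) =====
-- stated objective: simpler
-- what changed: Replaces A's per-priority-pin rescan of pin_scores (and list membership tests) with a single pass that builds a first-occurrence dict for priority pins and the non-priority list, then emits dict hits in the fixed priority order.
import Mathlib
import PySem

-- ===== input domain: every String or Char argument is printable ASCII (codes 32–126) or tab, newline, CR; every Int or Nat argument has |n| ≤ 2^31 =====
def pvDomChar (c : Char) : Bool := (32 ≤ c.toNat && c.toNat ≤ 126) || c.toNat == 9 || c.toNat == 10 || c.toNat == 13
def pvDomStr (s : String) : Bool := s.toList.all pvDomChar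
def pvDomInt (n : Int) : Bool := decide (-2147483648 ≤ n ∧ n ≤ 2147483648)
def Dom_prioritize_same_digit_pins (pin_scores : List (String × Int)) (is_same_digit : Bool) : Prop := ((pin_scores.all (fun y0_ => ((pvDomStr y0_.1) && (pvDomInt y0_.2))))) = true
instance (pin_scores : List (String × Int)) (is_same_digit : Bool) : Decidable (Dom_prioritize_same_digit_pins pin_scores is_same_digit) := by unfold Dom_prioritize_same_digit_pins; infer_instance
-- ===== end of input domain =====

-- ===== PORT A =====
-- B changes: one pass builds a first-occurrence dict for priority pins plus the non-priority
-- list, replacing A's nested scan per priority pin (objective: alternative/simpler).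
-- helper shared by both ports: Python's  [str(d)*PIN_LENGTH for d in range(1,10)] + ["0"*PIN_LENGTH]
-- (s * n on strings ported exactly via PySem.List.pyRepeat on the char list)
def pvPriorityPins : List String :=
  ((PySem.List.pyRange 1 10 1).map
      (fun d => String.mk (PySem.List.pyRepeat (PySem.Int.toStr d).toList 4)))
    ++ [String.mk (PySem.List.pyRepeat "0".toList 4)]

def prioritize_same_digit_pins (pin_scores : List (String × Int)) (is_same_digit : Bool) : List (String × Int) :=
  if !is_same_digit then pin_scores
  else
    let priority_pins := pvPriorityPins
    -- for pin, score in pin_scores: if pin not in priority_pins: non_priority_pins.append(...)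
    let non_priority_pins :=
      pin_scores.foldl (fun acc x => if priority_pins.contains x.1 then acc else acc ++ [x]) []
    -- for p_pin in priority_pins: for pin, score in pin_scores: if pin == p_pin: append; break
    let prioritized_scores :=
      priority_pins.foldl (fun acc p =>
        match pin_scores.find? (fun x => x.1 == p) with
        | some x => acc ++ [x]
        | none => acc) []
    prioritized_scores ++ non_priority_pins

-- ===== PORT B =====
-- the body of B's single loop: maintain (first-occurrence dict, non-priority list)
def pvAltStep (pset : PySem.Set String)
    (st : PySem.Dict String (String × Int) × List (String × Int)) (x : String × Int) :
    PySem.Dict String (String × Int) × List (String × Int) :=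
  if PySem.Set.contains pset x.1 then
    if st.1.contains x.1 then st else (st.1.insert x.1 x, st.2)
  else (st.1, st.2 ++ [x])

def prioritize_same_digit_pins_alt (pin_scores : List (String × Int)) (is_same_digit : Bool) : List (String × Int) :=
  if !is_same_digit then pin_scores
  else
    let priority_order := pvPriorityPins
    let priority_set := PySem.Set.ofList priority_order
    let st := pin_scores.foldl (pvAltStep priority_set) (PySem.Dict.empty, [])
    (priority_order.foldl (fun acc p =>
        match st.1.get? p with
        | some e => acc ++ [e]
        | none => acc) [])
      ++ st.2

-- ===== PRECONDITION & SPEC =====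
def Spec_prioritize_same_digit_pins (pin_scores : List (String × Int)) (is_same_digit : Bool) (out : List (String × Int)) : Prop := out = prioritize_same_digit_pins_alt pin_scores is_same_digit
instance (pin_scores : List (String × Int)) (is_same_digit : Bool) (out : List (String × Int)) : Decidable (Spec_prioritize_same_digit_pins pin_scores is_same_digit out) := by unfold Spec_prioritize_same_digit_pins; infer_instance

-- ===== CLAIM (what is proved, stated in full; the proofs are below) =====
def Claim_equal_prioritize_same_digit_pins : Prop := ∀ (pin_scores : List (String × Int)) (is_same_digit : Bool), Dom_prioritize_same_digit_pins pin_scores is_same_digit → Spec_prioritize_same_digit_pins pin_scores is_same_digit (prioritize_same_digit_pins pin_scores is_same_digit)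

-- ===== LEMMAS AND PROOFS =====

-- membership in the priority set is membership in the priority list
lemma pvPset_contains (p : String) :
    PySem.Set.contains (PySem.Set.ofList pvPriorityPins) p = pvPriorityPins.contains p := by
  simp [pysem]

-- the dict after B's loop holds, for each priority pin, its first occurrence = A's find?
lemma pvDict_get (ps : List (String × Int)) (d : PySem.Dict String (String × Int))
    (r : List (String × Int)) (p : String)
    (hp : PySem.Set.contains (PySem.Set.ofList pvPriorityPins) p = true) :
    (ps.foldl (pvAltStep (PySem.Set.ofList pvPriorityPins)) (d, r)).1.get? p
      = (d.get? p).or (ps.find? (fun x => x.1 == p)) := by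
  induction ps generalizing d r with
  | nil => simp
  | cons x ps ih =>
    rw [List.foldl_cons]
    by_cases hxp : x.1 = p
    · subst hxp
      rcases hd : d.get? x.1 with _ | v
      · have hdc : d.contains x.1 = false := by
          rw [PySem.Dict.contains_eq_isSome_get?, hd]; rfl
        have hstep : pvAltStep (PySem.Set.ofList pvPriorityPins) (d, r) x = (d.insert x.1 x, r) := by
          unfold pvAltStep; rw [if_pos hp, if_neg (by simp [hdc])]
        rw [hstep, ih, PySem.Dict.get?_insert_self]
        simp [hd]
      · have hdc : d.contains x.1 = true := by
          rw [PySem.Dict.contains_eq_isSome_get?, hd]; rfl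
        have hstep : pvAltStep (PySem.Set.ofList pvPriorityPins) (d, r) x = (d, r) := by
          unfold pvAltStep; rw [if_pos hp, if_pos hdc]
        rw [hstep, ih, hd]
        simp
    · have hfind : List.find? (fun y => y.1 == p) (x :: ps) = List.find? (fun y => y.1 == p) ps := by
        simp [hxp]
      rw [hfind]
      by_cases hx : PySem.Set.contains (PySem.Set.ofList pvPriorityPins) x.1 = true
      · by_cases hd : d.contains x.1 = true
        · have hstep : pvAltStep (PySem.Set.ofList pvPriorityPins) (d, r) x = (d, r) := by
            unfold pvAltStep; rw [if_pos hx, if_pos hd]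
          rw [hstep, ih]
        · have hstep : pvAltStep (PySem.Set.ofList pvPriorityPins) (d, r) x = (d.insert x.1 x, r) := by
            unfold pvAltStep; rw [if_pos hx, if_neg hd]
          rw [hstep, ih, PySem.Dict.get?_insert_of_ne _ _ (fun h => hxp h.symm)]
      · have hstep : pvAltStep (PySem.Set.ofList pvPriorityPins) (d, r) x = (d, r ++ [x]) := by
          unfold pvAltStep; rw [if_neg hx]
        rw [hstep, ih]

-- the second component of B's loop state is A's non-priority filter loop
lemma pvRest (ps : List (String × Int)) (d : PySem.Dict String (String × Int))
    (r : List (String × Int)) :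
    (ps.foldl (pvAltStep (PySem.Set.ofList pvPriorityPins)) (d, r)).2
      = ps.foldl (fun acc x => if pvPriorityPins.contains x.1 then acc else acc ++ [x]) r := by
  induction ps generalizing d r with
  | nil => rfl
  | cons x ps ih =>
    simp only [List.foldl_cons, pvAltStep, pvPset_contains]
    cases hx : pvPriorityPins.contains x.1
    · simp [ih]
    · cases hd : d.contains x.1 <;> simp [ih]

-- ===== VERDICT (by name: the statement is the Claim_ definition above) =====
theorem prioritize_same_digit_pins_spec : Claim_equal_prioritize_same_digit_pins := by
  intro ps b _
  unfold Spec_prioritize_same_digit_pins prioritize_same_digit_pins prioritize_same_digit_pins_alt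
  cases b
  · rfl
  · simp only [Bool.not_true, Bool.false_eq_true, if_false]
    rw [pvRest]
    refine congrArg (fun l => l ++ _) ?_
    symm
    apply PySem.List.foldl_congr_mem
    intro acc p hp
    have hps : PySem.Set.contains (PySem.Set.ofList pvPriorityPins) p = true := by
      rw [pvPset_contains]; simpa using hp
    rw [pvDict_get _ _ _ _ hps]
    simp
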